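-- pv_equiv track=rewrite | github.com/pypi-data/pypi-mirror-282 | packages/bincfg/bincfg-1.0.2.tar.gz/bincfg-1.0.2/src/bincfg/normalization/base_normalizer.py | _norm_str
-- ===== SOURCE A (Python) =====
-- def _norm_str(token):
--     """Normalizes a string token
--
--     `token` should be the string token, including the starting/ending quotes (can be either single or double quotes,
--     but must be matching).
--
--     Strings are normalized for readability. This can handle unicode, escaped characters, etc. Strings are treated
--     how python would treat them (regarding how to escape characters, etc.).
--
--     The general workflow is:
--
--         1. Encode the string into 'utf-8' bytes, then convert to a string. This forces python to convert any weird
--            characters (tabs, newlines, unicode, extra quotes, ...) into escaped format.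
--         2. Remove the starting quote + 'b' and ending quote to get the original string in this new format
--         3. Un-escape any doubly escaped '\\' characters that were escaped when converting into 'utf-8'
--         4. Replace any escaped single quotes with plain single quotes, but only under certain conditions, see the note below.
--         5. Remove the old starting/ending quotes
--         6. Go through the string finding any un-escaped double quotes and escape them
--         7. Replace any escaped single quotes with plain single quotes since we only use double quotes as outer quotes
--
--     NOTE: As far as I can tell, calling str() on the encoded string functions much like calling repr() on a string. It will
--     default to wrapping the string in single quotes, UNLESS that string contains single quotes in which case it will
--     wrap in double quotes so as to not have to escape the single quotes, UNLESS-UNLESS the string also contains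
--     double quotes in which case it will wrap in single quotes and escape all inner single quotes. So, if the string
--     contains both single and double quotes, we'll have to un-escape any single quotes within the string to keep
--     everything normalized as expected.
--
--     This should be able to normalize any weird combinations of characters/spacing/unicode/etc., and force strings to
--     start/end with double quotes.
--     """
--     encoded = str(token.encode('utf-8'))[2:-1].replace('\\\\', '\\')
--
--     # Remove extra escapes possibly added
--     if '"' in encoded and "'" in encoded:
--         encoded = encoded.replace("\\'", "'")
--
--     # Check escaped characters to find un-escaped double quotes, and escape them
--     escaped = ""
--     last_escape = False
--     for c in encoded[1:-1]:
--         # If this is a double quote that was not escaped, add in an escape character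
--         if c == '"' and not last_escape:
--             escaped += '\\'
--
--         # If the last character was an escape character, turn off last_escape. Otherwise if this
--         #   is an escape character, turn on last_escape
--         last_escape = False if last_escape else (c == '\\')
--
--         # Add in this character always
--         escaped += c
--
--     return '"' + escaped.replace("\\'", "'") + '"'
-- ===== SOURCE B (Python) =====
-- def _norm_str(token):
--     encoded = str(token.encode('utf-8'))[2:-1].replace('\\\\', '\\')
--
--     # Remove extra escapes possibly added
--     if '"' in encoded and "'" in encoded:
--         encoded = encoded.replace("\\'", "'")
--
--     # Scan the body consuming escape sequences as two-character pairs;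
--     # any '"' seen at a pair boundary is inherently un-escaped, so escape it.
--     body = encoded[1:-1]
--     parts = []
--     i = 0
--     n = len(body)
--     while i < n:
--         c = body[i]
--         if c == '\\':
--             parts.append(body[i:i + 2])
--             i += 2
--         elif c == '"':
--             parts.append('\\"')
--             i += 1
--         else:
--             parts.append(c)
--             i += 1
--     return '"' + ''.join(parts).replace("\\'", "'") + '"'
-- ===== Notes on version B (the rewrite author's own statement) =====
-- stated objective: alternative
-- what changed: The last_escape boolean state machine over encoded[1:-1] is replaced by an index while-loop that consumes a backslash together with its following character as a two-character pair and escapes any double quote seen at a pair boundary.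
import Mathlib
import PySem

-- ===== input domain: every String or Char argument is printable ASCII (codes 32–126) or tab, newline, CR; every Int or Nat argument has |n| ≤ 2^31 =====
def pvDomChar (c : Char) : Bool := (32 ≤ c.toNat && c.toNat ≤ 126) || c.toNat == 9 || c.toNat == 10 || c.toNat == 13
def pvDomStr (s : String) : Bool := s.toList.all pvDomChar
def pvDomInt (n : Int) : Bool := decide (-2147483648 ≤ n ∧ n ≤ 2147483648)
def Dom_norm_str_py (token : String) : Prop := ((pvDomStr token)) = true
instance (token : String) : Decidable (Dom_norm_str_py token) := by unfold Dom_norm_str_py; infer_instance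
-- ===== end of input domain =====

-- B replaces A's last_escape boolean state machine by a scanner that consumes escape
-- sequences as two-character pairs (objective: alternative decomposition, same cost).

-- ===== PORT A =====
-- Hand port of `str(token.encode('utf-8'))` (bytes repr), exact on Dom (printable
-- ASCII plus tab/newline/CR): choose the quote as CPython does, escape backslash,
-- the chosen quote, tab, newline and CR.
def pvEscByte (q : Char) (c : Char) : List Char :=
  if c = '\\' then ['\\', '\\']
  else if c = q then ['\\', q]
  else if c = '\t' then ['\\', 't']
  else if c = '\n' then ['\\', 'n']
  else if c = '\r' then ['\\', 'r']
  else [c]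

def pvBytesRepr (l : List Char) : List Char :=
  let q : Char := if l.contains '\'' ∧ ¬ l.contains '"' then '"' else '\''
  'b' :: q :: (l.flatMap (pvEscByte q)) ++ [q]

-- shared preamble of A and B (identical lines in both Pythons):
-- encoded = str(token.encode('utf-8'))[2:-1].replace('\\\\', '\\'); conditional un-escape of \'
def pvEncoded (l : List Char) : List Char :=
  let e := PySem.Chars.replace (PySem.List.slice (pvBytesRepr l) (some 2) (some (-1))) ['\\', '\\'] ['\\']
  if PySem.Chars.isIn ['"'] e ∧ PySem.Chars.isIn ['\''] e
  then PySem.Chars.replace e ['\\', '\''] ['\''] else e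

-- A's loop: fold over encoded[1:-1] with the (escaped, last_escape) state
def pvAStep (st : List Char × Bool) (c : Char) : List Char × Bool :=
  let esc := if c = '"' ∧ st.2 = false then st.1 ++ ['\\'] else st.1
  (esc ++ [c], if st.2 then false else c = '\\')

def norm_str_py (token : String) : String :=
  let encoded := pvEncoded token.toList
  let escaped := ((PySem.List.slice encoded (some 1) (some (-1))).foldl pvAStep ([], false)).1
  String.ofList ('"' :: PySem.Chars.replace escaped ['\\', '\''] ['\''] ++ ['"'])

-- ===== PORT B =====
-- B's while loop: consume '\' together with the following character; escape a bare '"'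
def pvBLoop : List Char → List Char
  | [] => []
  | c :: rest =>
    if c = '\\' then
      match rest with
      | [] => [c]                         -- body[i:i+2] is just the lone backslash
      | d :: rest' => c :: d :: pvBLoop rest'
    else if c = '"' then '\\' :: c :: pvBLoop rest
    else c :: pvBLoop rest

def norm_str_py_alt (token : String) : String :=
  let encoded := pvEncoded token.toList
  let body := PySem.List.slice encoded (some 1) (some (-1))
  String.ofList ('"' :: PySem.Chars.replace (pvBLoop body) ['\\', '\''] ['\''] ++ ['"'])

-- ===== PRECONDITION & SPEC =====
def Spec_norm_str_py (token : String) (out : String) : Prop := out = norm_str_py_alt token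
instance (token : String) (out : String) : Decidable (Spec_norm_str_py token out) := by unfold Spec_norm_str_py; infer_instance

-- ===== CLAIM (what is proved, stated in full; the proofs are below) =====
def Claim_equal_norm_str_py : Prop := ∀ (token : String), Dom_norm_str_py token → Spec_norm_str_py token (norm_str_py token)

-- ===== LEMMAS AND PROOFS =====

-- A's fold, written as a recursion on the list with the flag explicit
def pvARec : Bool → List Char → List Char
  | _, [] => []
  | flag, c :: rest =>
    (if c = '"' ∧ flag = false then ['\\'] else []) ++ c :: pvARec (if flag then false else c = '\\') rest

theorem pvFoldA (l : List Char) : ∀ (acc : List Char) (flag : Bool),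
    (l.foldl pvAStep (acc, flag)).1 = acc ++ pvARec flag l := by
  induction l with
  | nil => intro acc flag; simp [pvARec]
  | cons c rest ih =>
    intro acc flag
    simp only [List.foldl_cons, pvAStep, pvARec]
    rw [ih]
    split_ifs <;> simp_all

theorem pvARec_eq_pvBLoop : ∀ (l : List Char), pvARec false l = pvBLoop l
  | [] => rfl
  | c :: rest => by
    rw [pvBLoop.eq_def]
    by_cases hc : c = '\\'
    · subst hc
      match rest with
      | [] => rfl
      | d :: rest' => simp [pvARec, pvARec_eq_pvBLoop rest']
    · by_cases hq : c = '"'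
      · subst hq; simp [pvARec, hc, pvARec_eq_pvBLoop rest]
      · simp [pvARec, hc, hq, pvARec_eq_pvBLoop rest]

-- ===== VERDICT (by name: the statement is the Claim_ definition above) =====
theorem norm_str_py_spec : Claim_equal_norm_str_py := by
  intro token _
  unfold Spec_norm_str_py norm_str_py norm_str_py_alt
  simp only [pvFoldA, pvARec_eq_pvBLoop, List.nil_append]
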